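-- pv_equiv track=rewrite | github.com/szkjn/algorithmic-playground | Python/replace_consecutive_zeros_by_its_length.py | replaceZeros
-- ===== SOURCE A (Python) =====
-- def replaceZeros(digits: str) -> str:
--
--     res = ""
--     count = 0
--
--     for i, digit in enumerate(digits):
--         if digit == "0":
--             count += 1
--             if i == len(digits) - 1:
--                 res += str(count)
--         else:
--             if count > 0:
--                 res += str(count)
--                 count = 0
--             res += digit
--
--     return res
-- ===== SOURCE B (Python) =====
-- def replaceZeros(digits: str) -> str:
--     out = []
--     i = 0
--     n = len(digits)
--     while i < n:
--         if digits[i] == "0":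
--             j = i
--             while j < n and digits[j] == "0":
--                 j += 1
--             out.append(str(j - i))
--         else:
--             j = i
--             while j < n and digits[j] != "0":
--                 j += 1
--             out.append(digits[i:j])
--         i = j
--     return "".join(out)
-- ===== Notes on version B (the rewrite author's own statement) =====
-- stated objective: alternative
-- what changed: Replaces A's per-character counter with a trailing-index special case by a run-segmentation scan: each maximal run of zeros or of non-zeros is located with an inner pointer and emitted as a whole (length or slice), joined at the end.
import Mathlib
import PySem

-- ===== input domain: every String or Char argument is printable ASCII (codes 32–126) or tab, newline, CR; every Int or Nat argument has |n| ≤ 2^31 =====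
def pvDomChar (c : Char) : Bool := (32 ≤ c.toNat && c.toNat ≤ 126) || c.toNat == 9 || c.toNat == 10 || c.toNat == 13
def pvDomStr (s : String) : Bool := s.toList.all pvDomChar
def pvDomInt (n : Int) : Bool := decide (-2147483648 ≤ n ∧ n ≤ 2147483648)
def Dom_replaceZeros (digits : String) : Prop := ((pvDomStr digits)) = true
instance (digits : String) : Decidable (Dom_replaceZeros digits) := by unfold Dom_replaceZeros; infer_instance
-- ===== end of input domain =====

-- B replaces A's per-character counter (with its last-index special case) by a run-segmentation
-- scan (maximal zero / non-zero runs emitted whole); alternative decomposition, same O(n) cost.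

-- ===== PORT A =====
-- one step of A's loop body (res, count as loop state; n = len(digits))
def stepA (n : Int) (st : List Char × Int) (p : Int × Char) : List Char × Int :=
  if p.2 = '0' then
    let count := st.2 + 1
    if p.1 = n - 1 then (st.1 ++ PySem.Int.toChars count, count) else (st.1, count)
  else
    let st' := if st.2 > 0 then (st.1 ++ PySem.Int.toChars st.2, (0 : Int)) else st
    (st'.1 ++ [p.2], st'.2)

def replaceZeros (digits : String) : String :=
  String.ofList (((PySem.List.enumerate digits.toList).foldl
    (stepA (digits.toList.length : Int)) ([], 0)).1)

-- ===== PORT B =====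
-- Source B's outer while loop; the inner scans for the run end are takeWhile/dropWhile
def altGo (l : List Char) : List Char :=
  match l with
  | [] => []
  | c :: t =>
    if c = '0' then
      PySem.Int.toChars (((c :: t).takeWhile (· == '0')).length : Int)
        ++ altGo ((c :: t).dropWhile (· == '0'))
    else
      (c :: t).takeWhile (· != '0') ++ altGo ((c :: t).dropWhile (· != '0'))
termination_by l.length
decreasing_by
  · simp_all [List.dropWhile]
    exact List.length_dropWhile_le _ _
  · rename_i h
    have hb : (c == '0') = false := by simp_all
    simp [List.dropWhile, bne, hb]
    exact List.length_dropWhile_le _ _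

def replaceZeros_alt (digits : String) : String := String.ofList (altGo digits.toList)

-- ===== PRECONDITION & SPEC =====
def Spec_replaceZeros (digits : String) (out : String) : Prop := out = replaceZeros_alt digits
instance (digits : String) (out : String) : Decidable (Spec_replaceZeros digits out) := by unfold Spec_replaceZeros; infer_instance

-- ===== CLAIM (what is proved, stated in full; the proofs are below) =====
def Claim_equal_replaceZeros : Prop := ∀ (digits : String), Dom_replaceZeros digits → Spec_replaceZeros digits (replaceZeros digits)

-- ===== LEMMAS AND PROOFS =====

-- abstract description of A's loop result on a suffix, given the pending zero count
def g (count : Int) : List Char → List Char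
  | [] => []
  | c :: t =>
    if c = '0' then
      if t = [] then PySem.Int.toChars (count + 1) else g (count + 1) t
    else
      (if count > 0 then PySem.Int.toChars count else []) ++ c :: g 0 t

lemma foldA_eq_g (n : Int) : ∀ (l : List Char) (s : Int) (res : List Char) (count : Int),
    0 ≤ count → s + (l.length : Int) = n →
    ((PySem.List.enumerate l s).foldl (stepA n) (res, count)).1 = res ++ g count l := by
  intro l
  induction l with
  | nil => intro s res count _ _; simp [PySem.List.enumerate, g]
  | cons c t ih =>
    intro s res count hnn h
    rw [PySem.List.enumerate_cons]
    simp only [List.foldl_cons]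
    by_cases hc : c = '0'
    · subst hc
      by_cases ht : t = []
      · subst ht
        have hs : s = n - 1 := by simp at h; omega
        simp [stepA, hs, g, PySem.List.enumerate]
      · have ht' : 0 < t.length := List.length_pos_iff.mpr ht
        have hs : ¬ (s = n - 1) := by simp at h; omega
        have hstep : stepA n (res, count) (s, '0') = (res, count + 1) := by
          simp [stepA, hs]
        rw [hstep, ih (s+1) res (count+1) (by omega) (by simp at h ⊢; omega)]
        simp [g, ht]
    · by_cases hcnt : count > 0
      · have hstep : stepA n (res, count) (s, c) = (res ++ PySem.Int.toChars count ++ [c], 0) := by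
          simp [stepA, hc, hcnt]
        rw [hstep, ih (s+1) _ 0 le_rfl (by simp at h ⊢; omega)]
        simp [g, hc, hcnt]
      · have hc0 : count = 0 := by omega
        subst hc0
        have hstep : stepA n (res, 0) (s, c) = (res ++ [c], 0) := by
          simp [stepA, hc]
        rw [hstep, ih (s+1) _ 0 le_rfl (by simp at h ⊢; omega)]
        simp [g, hc]

-- flushing a pending zero run: g emits count + the zeros still ahead, then continues after them
lemma g_zeros : ∀ (t : List Char) (count : Int), 0 ≤ count →
    g count ('0' :: t)
      = PySem.Int.toChars (count + 1 + ((t.takeWhile (· == '0')).length : Int))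
        ++ g 0 (t.dropWhile (· == '0')) := by
  intro t
  induction t with
  | nil => intro count _; simp [g]
  | cons c t' ih =>
    intro count hc
    by_cases h0 : c = '0'
    · subst h0
      show g (count + 1) ('0' :: t') = _
      rw [ih (count + 1) (by omega)]
      simp [List.takeWhile, List.dropWhile]
      ring_nf
    · have hb : (c == '0') = false := by simp [h0]
      have h1 : g count ('0' :: c :: t') = g (count + 1) (c :: t') := by
        simp [g]
      rw [h1]
      have hpos : count + 1 > 0 := by omega
      simp [g, h0, hpos, List.takeWhile, List.dropWhile, hb]

-- a non-zero stretch passes through g unchanged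
lemma g_nonzeros : ∀ (l : List Char),
    g 0 l = l.takeWhile (· != '0') ++ g 0 (l.dropWhile (· != '0')) := by
  intro l
  induction l with
  | nil => simp [g]
  | cons c t ih =>
    by_cases h0 : c = '0'
    · subst h0; simp [g, List.takeWhile, List.dropWhile]
    · have hb : (c != '0') = true := by simp [h0]
      simp [g, h0, List.takeWhile, List.dropWhile, hb]
      exact ih

lemma altGo_eq_g : ∀ (l : List Char), altGo l = g 0 l := by
  intro l
  induction l using altGo.induct with
  | case1 => simp [altGo, g]
  | case2 t ih =>
    rw [altGo, if_pos rfl]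
    rw [ih, g_zeros t 0 le_rfl]
    simp [List.takeWhile, List.dropWhile]
    ring_nf
  | case3 c t h0 ih =>
    rw [altGo, if_neg h0, ih]
    exact (g_nonzeros (c :: t)).symm

-- ===== VERDICT (by name: the statement is the Claim_ definition above) =====
theorem replaceZeros_spec : Claim_equal_replaceZeros := by
  intro digits _
  show _ = _
  unfold replaceZeros replaceZeros_alt
  rw [foldA_eq_g _ _ 0 [] 0 le_rfl (by omega), altGo_eq_g]
  simp
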